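-- pv_equiv track=rewrite | github.com/averi-u/Interview_liveCoding_practice | Citadel_OA_2.py | count_special_subarrays
-- ===== SOURCE A (Python) =====
-- def count_special_subarrays(arr):
--
--     from collections import defaultdict
--
--     prefix = 0
--     ans = 0
--     mp = defaultdict(lambda: defaultdict(int))
--
--     mp[arr[0]][0] = 1
--     prefix += arr[0]
--
--     for j in range(1, len(arr)):
--         b = arr[j]
--         target = prefix - 3 * b
--         ans += mp[b].get(target, 0)
--
--         mp[b][prefix] += 1
--         prefix += b
--
--     return ans
-- ===== SOURCE B (Python) =====
-- def count_special_subarrays(arr):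
--     # prefix sums: P[k] = arr[0] + ... + arr[k-1]
--     P = [0]
--     for x in arr:
--         P.append(P[-1] + x)
--     ans = 0
--     for j in range(len(arr)):
--         for i in range(j):
--             if arr[i] == arr[j] and P[j] - P[i] == 3 * arr[j]:
--                 ans += 1
--     return ans
-- ===== Notes on version B (the rewrite author's own statement) =====
-- stated objective: simpler
-- what changed: Replaced A's one-pass value->prefix nested hashmap with an explicit prefix-sum list and a direct nested scan over all pairs i<j, counting pairs with arr[i]==arr[j] and P[j]-P[i]==3*arr[j].
import Mathlib
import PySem

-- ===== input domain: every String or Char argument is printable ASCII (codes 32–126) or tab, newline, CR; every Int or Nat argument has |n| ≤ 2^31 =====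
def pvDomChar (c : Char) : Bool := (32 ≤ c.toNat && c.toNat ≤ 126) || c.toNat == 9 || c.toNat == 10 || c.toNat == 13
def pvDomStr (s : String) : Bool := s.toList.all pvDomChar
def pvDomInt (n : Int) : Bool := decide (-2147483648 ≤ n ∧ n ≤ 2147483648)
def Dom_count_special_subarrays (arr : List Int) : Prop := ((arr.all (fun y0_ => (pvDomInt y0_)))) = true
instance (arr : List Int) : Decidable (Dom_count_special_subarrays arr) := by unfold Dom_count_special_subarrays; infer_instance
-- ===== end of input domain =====

-- B changes the algorithm: prefix-sum list + direct nested pair scan instead of A's one-pass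
-- value→pfx hashmap; same return value on every non-empty list (return value only, no mutation).

-- ===== PORT A =====
-- one loop step of A: state = (pfx, ans, mp)
def pvAStep (arr : List Int)
    (st : Int × Int × PySem.Dict Int (PySem.Dict Int Int)) (j : Int) :
    Int × Int × PySem.Dict Int (PySem.Dict Int Int) :=
  let pfx := st.1
  let ans := st.2.1
  let mp := st.2.2
  let b := PySem.List.pyGetD arr j 0
  let target := pfx - 3 * b
  let inner := mp.getD b PySem.Dict.empty
  let ans := ans + inner.getD target 0
  let inner := inner.insert pfx (inner.getD pfx 0 + 1)
  (pfx + b, ans, mp.insert b inner)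

def count_special_subarrays (arr : List Int) : Int :=
  match PySem.List.pyGet? arr 0 with
  | none => 0   -- arr[0] raises IndexError in Python: excluded by Pre_
  | some a0 =>
    -- mp[arr[0]][0] = 1; pfx += arr[0]
    let mp0 : PySem.Dict Int (PySem.Dict Int Int) :=
      PySem.Dict.empty.insert a0 (PySem.Dict.empty.insert 0 1)
    let st := (PySem.List.pyRange 1 arr.length 1).foldl (pvAStep arr) (a0, 0, mp0)
    st.2.1

-- ===== PORT B =====
def count_special_subarrays_alt (arr : List Int) : Int :=
  let P := arr.foldl (fun P x => P ++ [PySem.List.pyGetD P (-1) 0 + x]) [(0 : Int)]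
  (PySem.List.pyRange 0 arr.length 1).foldl (fun ans j =>
    (PySem.List.pyRange 0 j 1).foldl (fun ans i =>
      if PySem.List.pyGetD arr i 0 = PySem.List.pyGetD arr j 0 ∧
         PySem.List.pyGetD P j 0 - PySem.List.pyGetD P i 0 = 3 * PySem.List.pyGetD arr j 0
      then ans + 1 else ans) ans) 0

-- ===== PRECONDITION & SPEC =====
-- Pre_ excludes exactly the empty list, on which A raises IndexError (arr[0]).
def Pre_count_special_subarrays (arr : List Int) : Prop := arr ≠ []
instance (arr : List Int) : Decidable (Pre_count_special_subarrays arr) := by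
  unfold Pre_count_special_subarrays; infer_instance

def pvWitness_count_special_subarrays : List Int := [3, 1, 1, 1, 2]

def Spec_count_special_subarrays (arr : List Int) (out : Int) : Prop := out = count_special_subarrays_alt arr
instance (arr : List Int) (out : Int) : Decidable (Spec_count_special_subarrays arr out) := by unfold Spec_count_special_subarrays; infer_instance

-- ===== CLAIM (what is proved, stated in full; the proofs are below) =====
def Claim_equal_count_special_subarrays : Prop := ∀ (arr : List Int), Dom_count_special_subarrays arr → Pre_count_special_subarrays arr → Spec_count_special_subarrays arr (count_special_subarrays arr)

-- ===== LEMMAS AND PROOFS =====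

def pvG (arr : List Int) (i : Nat) : Int := arr.getD i 0
def pvS (arr : List Int) (m : Nat) : Int := (arr.take m).sum
abbrev pvCond (arr : List Int) (i j : Nat) : Prop :=
  pvG arr i = pvG arr j ∧ pvS arr j - pvS arr i = 3 * pvG arr j
def pvCnt (arr : List Int) (j : Nat) : Int :=
  ((List.range j).countP (fun i => decide (pvCond arr i j)) : Int)
def pvAns (arr : List Int) (m : Nat) : Int := ((List.range m).map (pvCnt arr)).sum
def pvPairs (arr : List Int) (m : Nat) : List (Int × Int) :=
  (List.range m).map (fun i => (pvG arr i, pvS arr i))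
def pvStep (d : PySem.Dict Int (PySem.Dict Int Int)) (p : Int × Int) :
    PySem.Dict Int (PySem.Dict Int Int) :=
  d.insert p.1 ((d.getD p.1 PySem.Dict.empty).insert p.2
    ((d.getD p.1 PySem.Dict.empty).getD p.2 0 + 1))

lemma pvS_succ (arr : List Int) (m : Nat) (h : m < arr.length) :
    pvS arr (m + 1) = pvS arr m + pvG arr m := by
  unfold pvS pvG
  rw [List.sum_take_succ arr m h, List.getD_eq_getElem arr 0 h]

lemma pvNested (L : List (Int × Int)) (d : PySem.Dict Int (PySem.Dict Int Int))
    (b t : Int) :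
    ((L.foldl pvStep d).getD b PySem.Dict.empty).getD t 0 =
      (d.getD b PySem.Dict.empty).getD t 0 + L.count (b, t) := by
  induction L generalizing d with
  | nil => simp
  | cons p L ih =>
    simp only [List.foldl_cons, ih, List.count_cons]
    rw [pvStep]
    rw [PySem.Dict.getD_insert]
    by_cases hb : b = p.1
    · subst hb
      rw [if_pos rfl, PySem.Dict.getD_insert]
      by_cases ht : t = p.2
      · subst ht
        simp only [Prod.mk.eta, beq_self_eq_true, if_pos]
        push_cast
        ring
      · rw [if_neg ht]
        have h2 : ¬ p = (p.1, t) := fun h => ht (congrArg Prod.snd h).symm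
        simp [h2]
    · rw [if_neg hb]
      have h2 : ¬ p = (b, t) := fun h => hb (congrArg Prod.fst h).symm
      simp [h2]

lemma pvCountPairs (arr : List Int) (m : Nat) :
    ((pvPairs arr m).count (pvG arr m, pvS arr m - 3 * pvG arr m) : Int) = pvCnt arr m := by
  unfold pvPairs pvCnt
  rw [List.count, List.countP_map]
  congr 1
  apply List.countP_congr
  intro i _
  simp only [Function.comp_apply, beq_iff_eq, Prod.mk.injEq, pvCond, decide_eq_true_eq,
    Bool.decide_and, Bool.and_eq_true, decide_eq_true_eq]
  constructor
  · rintro ⟨h1, h2⟩; exact ⟨h1, by omega⟩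
  · rintro ⟨h1, h2⟩; exact ⟨h1, by omega⟩
-- value→pfx hashmap; same return value on every non-empty list (return value only, no mutation).


lemma pvAinv (arr : List Int) (h : arr ≠ []) (m : Nat) (h1 : 1 ≤ m) (hm : m ≤ arr.length) :
    (PySem.List.pyRange 1 (m : Int) 1).foldl (pvAStep arr)
      (pvG arr 0, 0, pvStep PySem.Dict.empty (pvG arr 0, 0)) =
    (pvS arr m, pvAns arr m, (pvPairs arr m).foldl pvStep PySem.Dict.empty) := by
  induction m with
  | zero => omega
  | succ m ih =>
    by_cases hm1 : m = 0
    · subst hm1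
      rw [show ((1:Nat) : Int) = 1 by norm_cast, PySem.List.pyRange_one_eq_nil (le_refl 1)]
      obtain ⟨a, t, rfl⟩ : ∃ a t, arr = a :: t := by
        cases arr with
        | nil => exact absurd rfl h
        | cons a t => exact ⟨a, t, rfl⟩
      simp [pvS, pvG, pvAns, pvCnt, pvPairs]
    · have hm' : 1 ≤ m := Nat.one_le_iff_ne_zero.mpr hm1
      have := ih hm' (by omega)
      rw [show ((m + 1 : Nat) : Int) = (m : Int) + 1 by push_cast; ring,
        PySem.List.pyRange_one_succ_right (by exact_mod_cast hm'),
        List.foldl_append, this]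
      simp only [List.foldl_cons, List.foldl_nil]
      rw [pvAStep]
      simp only [PySem.List.pyGetD_natCast]
      have hg : arr.getD m 0 = pvG arr m := rfl
      rw [hg]
      refine Prod.ext ?_ (Prod.ext ?_ ?_)
      · simp [pvS_succ arr m (by omega)]
      · simp only
        rw [pvNested, PySem.Dict.getD_empty, PySem.Dict.getD_empty, pvCountPairs]
        simp [pvAns, List.range_succ]
      · simp only
        rw [show pvPairs arr (m+1) = pvPairs arr m ++ [(pvG arr m, pvS arr m)] by
          simp [pvPairs, List.range_succ]]
        rw [List.foldl_append]
        rfl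

lemma pvAeq (arr : List Int) (h : arr ≠ []) :
    count_special_subarrays arr = pvAns arr arr.length := by
  obtain ⟨a, t, rfl⟩ : ∃ a t, arr = a :: t := by
    cases arr with
    | nil => exact absurd rfl h
    | cons a t => exact ⟨a, t, rfl⟩
  rw [count_special_subarrays]
  have h0 : PySem.List.pyGet? (a :: t) 0 = some a := by
    simp [PySem.List.pyGet?, PySem.List.pyIdx?]
  rw [h0]
  dsimp only
  have hst : ((a : Int), (0 : Int), (PySem.Dict.empty.insert a (PySem.Dict.empty.insert 0 1) :
      PySem.Dict Int (PySem.Dict Int Int))) =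
      (pvG (a :: t) 0, 0, pvStep PySem.Dict.empty (pvG (a :: t) 0, 0)) := by
    refine Prod.ext rfl (Prod.ext rfl ?_)
    simp only [pvStep]
    simp only [PySem.Dict.getD_empty]
    rfl
  rw [show ((a :: t).length : Int) = (((a :: t).length : Nat) : Int) by norm_cast]
  rw [hst, pvAinv (a :: t) (by simp) (a :: t).length (by simp) (le_refl _)]

lemma pvLastAppend (l : List Int) (e : Int) : PySem.List.pyGetD (l ++ [e]) (-1) 0 = e := by
  simp [PySem.List.pyGetD, PySem.List.pyGet?, PySem.List.pyIdx?]

lemma pvPfold (l : List Int) : ∀ (acc : List Int),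
    l.foldl (fun P x => P ++ [PySem.List.pyGetD P (-1) 0 + x]) acc =
      acc ++ (List.range l.length).map (fun k => PySem.List.pyGetD acc (-1) 0 + pvS l (k+1)) := by
  induction l with
  | nil => simp
  | cons x l ih =>
    intro acc
    simp only [List.foldl_cons, ih (acc ++ [PySem.List.pyGetD acc (-1) 0 + x]),
      pvLastAppend, List.length_cons, List.range_succ_eq_map, List.map_cons, List.map_map]
    rw [List.append_assoc]
    congr 1
    simp only [List.singleton_append, Function.comp_def]
    congr 1
    · simp [pvS]
    · apply List.map_congr_left
      intro k _
      have : pvS (x :: l) (k + 1 + 1) = x + pvS l (k + 1) := by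
        simp [pvS]
      rw [this]; ring

lemma pvPeq (arr : List Int) :
    arr.foldl (fun P x => P ++ [PySem.List.pyGetD P (-1) 0 + x]) [(0 : Int)] =
      (List.range (arr.length + 1)).map (pvS arr) := by
  rw [pvPfold arr [(0 : Int)]]
  have h0 : PySem.List.pyGetD [(0 : Int)] (-1) 0 = 0 := by
    simp [PySem.List.pyGetD, PySem.List.pyGet?, PySem.List.pyIdx?]
  rw [h0, List.range_succ_eq_map, List.map_cons, List.map_map]
  simp [pvS, Function.comp_def]

lemma pvPget (arr : List Int) (i : Nat) (hi : i ≤ arr.length) :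
    PySem.List.pyGetD ((List.range (arr.length + 1)).map (pvS arr)) (i : Int) 0 = pvS arr i := by
  rw [PySem.List.pyGetD_natCast]
  simp [List.getD, Nat.lt_succ_of_le hi]

lemma pvBeq (arr : List Int) :
    count_special_subarrays_alt arr = pvAns arr arr.length := by
  simp only [count_special_subarrays_alt]
  rw [pvPeq arr]
  rw [show ((arr.length : Int)) = ((arr.length : Nat) : Int) by norm_cast]
  rw [PySem.List.pyRange_zero_nat, List.foldl_map]
  have hF : ∀ (ans : Int) (j : Nat), j ∈ List.range arr.length →
      (PySem.List.pyRange 0 ((j : Nat) : Int) 1).foldl (fun ans i =>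
        if PySem.List.pyGetD arr i 0 = PySem.List.pyGetD arr ((j : Nat) : Int) 0 ∧
           PySem.List.pyGetD ((List.range (arr.length + 1)).map (pvS arr)) ((j : Nat) : Int) 0 -
             PySem.List.pyGetD ((List.range (arr.length + 1)).map (pvS arr)) i 0 =
           3 * PySem.List.pyGetD arr ((j : Nat) : Int) 0
        then ans + 1 else ans) ans = ans + pvCnt arr j := by
    intro ans j hj
    have hjn : j < arr.length := List.mem_range.mp hj
    rw [PySem.List.pyRange_zero_nat, List.foldl_map]
    have hG : ∀ (a : Int) (i : Nat), i ∈ List.range j →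
        (if PySem.List.pyGetD arr ((i : Nat) : Int) 0 = PySem.List.pyGetD arr ((j : Nat) : Int) 0 ∧
           PySem.List.pyGetD ((List.range (arr.length + 1)).map (pvS arr)) ((j : Nat) : Int) 0 -
             PySem.List.pyGetD ((List.range (arr.length + 1)).map (pvS arr)) ((i : Nat) : Int) 0 =
           3 * PySem.List.pyGetD arr ((j : Nat) : Int) 0
         then a + 1 else a) = (if pvCond arr i j then a + 1 else a) := by
      intro a i hi
      have hij : i < j := List.mem_range.mp hi
      congr 1
      simp only [PySem.List.pyGetD_natCast, pvPget arr i (by omega), pvPget arr j (by omega),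
        pvCond, pvG]
    rw [PySem.List.foldl_congr_mem _ _ _ _ hG, PySem.List.foldl_ite_add_one]
    rfl
  rw [PySem.List.foldl_congr_mem _ _ _ _ hF, PySem.List.foldl_add]
  simp [pvAns]


-- ===== VERDICT (by name: the statement is the Claim_ definition above) =====
theorem count_special_subarrays_spec : Claim_equal_count_special_subarrays := by
  intro arr _ hpre
  unfold Spec_count_special_subarrays
  rw [pvAeq arr hpre, pvBeq arr]
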